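-- pv_equiv track=rewrite | github.com/deepakpanigrahy03/alems-platform | gui/db.py | _fix_round
-- ===== SOURCE A (Python) =====
-- def _fix_round(sql: str) -> str:
--     """
--     Replace ROUND(expr, n) with ROUND(CAST(expr AS NUMERIC), n).
--     Uses parenthesis counting to handle any level of nesting correctly.
--     Works on both SQLite and PostgreSQL.
--     """
--     result = []
--     i = 0
--     upper = sql.upper()
--     while i < len(sql):
--         if upper[i:i+6] == 'ROUND(' :
--             result.append('ROUND(CAST(')
--             i += 6
--             depth  = 1
--             inner  = []
--             while i < len(sql) and depth > 0:
--                 c = sql[i]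
--                 if c == '(':
--                     depth += 1
--                 elif c == ')':
--                     depth -= 1
--                     if depth == 0:
--                         break
--                 inner.append(c)
--                 i += 1
--             i += 1  # skip closing )
--
--             inner_str = ''.join(inner)
--
--             # Find last comma at depth 0 — separates expr from precision
--             d, last_comma = 0, -1
--             for j, c in enumerate(inner_str):
--                 if c == '(':
--                     d += 1
--                 elif c == ')':
--                     d -= 1
--                 elif c == ',' and d == 0:
--                     last_comma = j
--
--             if last_comma >= 0:
--                 expr      = inner_str[:last_comma].strip()
--                 precision = inner_str[last_comma + 1:].strip()
--                 result.append(f'{expr} AS NUMERIC), {precision})')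
--             else:
--                 # ROUND with single arg — no precision
--                 result.append(f'{inner_str} AS NUMERIC))')
--         else:
--             result.append(sql[i])
--             i += 1
--
--     return ''.join(result)
-- ===== SOURCE B (Python) =====
-- def _fix_round(sql: str) -> str:
--     """Recursive find-and-splice: locate the next ROUND call with str.find, scan
--     once to the matching close-paren while tracking the last top-level comma,
--     splice the rewritten call between slices, and recurse on the suffix."""
--     pos = sql.upper().find('ROUND(')
--     if pos < 0:
--         return sql
--     rest = sql[pos + 6:]
--     depth, j, last, n = 1, 0, -1, len(rest)
--     while j < n:
--         c = rest[j]
--         if c == '(':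
--             depth += 1
--         elif c == ')':
--             depth -= 1
--             if depth == 0:
--                 break
--         elif c == ',' and depth == 1:
--             last = j
--         j += 1
--     inner = rest[:j]
--     if last >= 0:
--         rep = 'ROUND(CAST(' + inner[:last].strip() + ' AS NUMERIC), ' + inner[last + 1:].strip() + ')'
--     else:
--         rep = 'ROUND(CAST(' + inner + ' AS NUMERIC))'
--     return sql[:pos] + rep + _fix_round(rest[j + 1:])
-- ===== Notes on version B (the rewrite author's own statement) =====
-- stated objective: faster
-- what changed: B is a recursive find-and-splice: str.find locates the next ROUND call, one scan to the matching close-paren tracks the last top-level comma, and the rewritten call is spliced between whole string slices, replacing A's character-by-character Python copy loop that rebuilds and re-scans the inner string.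
import Mathlib
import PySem

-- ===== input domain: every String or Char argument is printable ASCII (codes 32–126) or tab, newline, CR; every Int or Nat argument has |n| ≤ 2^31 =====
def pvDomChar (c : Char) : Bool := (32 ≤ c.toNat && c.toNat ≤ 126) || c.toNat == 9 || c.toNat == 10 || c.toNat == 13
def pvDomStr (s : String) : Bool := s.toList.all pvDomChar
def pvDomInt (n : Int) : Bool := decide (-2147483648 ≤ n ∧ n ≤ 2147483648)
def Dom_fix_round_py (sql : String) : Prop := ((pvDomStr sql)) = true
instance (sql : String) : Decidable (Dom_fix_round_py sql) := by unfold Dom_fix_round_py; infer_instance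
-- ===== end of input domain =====

-- B replaces A's character-copying outer loop by a recursive find-and-splice whose single scan to the
-- matching close-paren also tracks the last top-level comma; equal return values are proved.

-- ===== PORT A =====

-- A's inner while loop: collects the body of ROUND( up to the matching ')', returns (inner, rest-after-')').
-- depth is carried as an Int exactly as in Python.
def pvCollectA : List Char → Int → (List Char × List Char)
  | [], _ => ([], [])
  | c :: t, depth =>
    if c = '(' then
      let (inn, r) := pvCollectA t (depth + 1)
      (c :: inn, r)
    else if c = ')' then
      if depth - 1 = 0 then ([], t)   -- break before appending; i += 1 skips the ')'
      else
        let (inn, r) := pvCollectA t (depth - 1)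
        (c :: inn, r)
    else
      let (inn, r) := pvCollectA t depth
      (c :: inn, r)

theorem pvCollectA_rest_le : ∀ (t : List Char) (d : Int), (pvCollectA t d).2.length ≤ t.length := by
  intro t
  induction t with
  | nil => intro d; simp [pvCollectA]
  | cons c t ih =>
    intro d
    simp only [pvCollectA]
    split
    · simpa using Nat.le_succ_of_le (ih (d + 1))
    · split
      · split
        · simp
        · simpa using Nat.le_succ_of_le (ih (d - 1))
      · simpa using Nat.le_succ_of_le (ih d)

-- A's 'for j, c in enumerate(inner_str)' loop finding the last comma at depth 0; state (d, last_comma).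
def pvScanA : List Char → Int → (Int × Int) → (Int × Int)
  | [], _, st => st
  | c :: cs, j, (d, last) =>
    if c = '(' then pvScanA cs (j + 1) (d + 1, last)
    else if c = ')' then pvScanA cs (j + 1) (d - 1, last)
    else if c = ',' ∧ d = 0 then pvScanA cs (j + 1) (d, j)
    else pvScanA cs (j + 1) (d, last)

-- A's outer while loop over the characters (upper[i:i+6] = sql[i:i+6].upper() charwise on this ASCII domain).
def pvLoopA : List Char → List Char
  | [] => []
  | c :: t =>
    if PySem.Chars.upper ((c :: t).take 6) = "ROUND(".toList then
      let p := pvCollectA ((c :: t).drop 6) 1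
      let inner := p.1
      let last := (pvScanA inner 0 (0, -1)).2
      (if last ≥ 0 then
        "ROUND(CAST(".toList ++ PySem.Chars.strip (inner.take last.toNat)
          ++ " AS NUMERIC), ".toList ++ PySem.Chars.strip (inner.drop (last.toNat + 1)) ++ [')']
      else
        "ROUND(CAST(".toList ++ inner ++ " AS NUMERIC))".toList) ++ pvLoopA p.2
    else
      c :: pvLoopA t
  termination_by s => s.length
  decreasing_by
  · have h := pvCollectA_rest_le (t.drop 5) 1
    simp only [List.drop_succ_cons, List.length_cons, List.length_drop] at h ⊢
    omega
  · simp

def fix_round_py (sql : String) : String := String.mk (pvLoopA sql.toList)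

-- ===== PORT B =====

-- B's sql.upper().find('ROUND('): first index whose 6-char window uppercases to "ROUND("
-- (str.upper is character-wise on the ASCII domain, so the window test equals the search in the uppered string).
def pvFindRound : List Char → Option Nat
  | [] => none
  | c :: t =>
    if PySem.Chars.upper ((c :: t).take 6) = "ROUND(".toList then some 0
    else (pvFindRound t).map (· + 1)

-- B's while loop over rest: one scan to the matching close-paren that also tracks the last top-level comma;
-- returns (j at the break or end, last).
def pvScanB : List Char → Int → Int → Int → Int × Int
  | [], _, j, last => (j, last)
  | c :: t, depth, j, last =>
    if c = '(' then pvScanB t (depth + 1) (j + 1) last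
    else if c = ')' then
      if depth - 1 = 0 then (j, last) else pvScanB t (depth - 1) (j + 1) last
    else if c = ',' ∧ depth = 1 then pvScanB t depth (j + 1) j
    else pvScanB t depth (j + 1) last

-- B's body after the find: builds the replacement from slices of rest and returns it with the suffix rest[j+1:].
def pvEmit (rest : List Char) : List Char × List Char :=
  let p := pvScanB rest 1 0 (-1)
  let inner := rest.take p.1.toNat
  ((if p.2 ≥ 0 then
      "ROUND(CAST(".toList ++ PySem.Chars.strip (inner.take p.2.toNat)
        ++ " AS NUMERIC), ".toList ++ PySem.Chars.strip (inner.drop (p.2.toNat + 1)) ++ [')']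
    else
      "ROUND(CAST(".toList ++ inner ++ " AS NUMERIC))".toList),
   rest.drop (p.1.toNat + 1))

-- B's recursion: prefix before the match ++ rewritten call ++ recurse on the suffix.
def pvFixB (s : List Char) : List Char :=
  match h : pvFindRound s with
  | none => s
  | some pos =>
    let e := pvEmit (s.drop (pos + 6))
    s.take pos ++ e.1 ++ pvFixB e.2
  termination_by s.length
  decreasing_by
    have hs : 0 < s.length := by
      cases s with
      | nil => simp [pvFindRound] at h
      | cons c t => simp
    simp only [pvEmit, List.length_drop]
    omega

def fix_round_py_alt (sql : String) : String := String.mk (pvFixB sql.toList)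

-- ===== PRECONDITION & SPEC =====
def Spec_fix_round_py (sql : String) (out : String) : Prop := out = fix_round_py_alt sql
instance (sql : String) (out : String) : Decidable (Spec_fix_round_py sql out) := by unfold Spec_fix_round_py; infer_instance

-- ===== CLAIM (what is proved, stated in full; the proofs are below) =====
def Claim_equal_fix_round_py : Prop := ∀ (sql : String), Dom_fix_round_py sql → Spec_fix_round_py sql (fix_round_py sql)

-- ===== LEMMAS AND PROOFS =====

-- A's collected inner string is the prefix of the scanned text, and the rest is the suffix past the ')'.
theorem collectA_split : ∀ (t : List Char) (d : Int),
    (pvCollectA t d).1 = t.take (pvCollectA t d).1.length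
    ∧ (pvCollectA t d).2 = t.drop ((pvCollectA t d).1.length + 1) := by
  intro t
  induction t with
  | nil => intro d; simp [pvCollectA]
  | cons c t ih =>
    intro d
    by_cases h1 : c = '('
    · simp only [pvCollectA, h1, if_true]
      obtain ⟨hl, hr⟩ := ih (d + 1)
      constructor
      · simp only [List.length_cons, List.take_succ_cons]; rw [← hl]
      · simp only [List.length_cons, List.drop_succ_cons]
        rw [hr]
    · by_cases h2 : c = ')'
      · by_cases h3 : d - 1 = 0
        · simp [pvCollectA, if_neg h1, if_pos h2, if_pos h3]
        · simp only [pvCollectA, if_neg h1, if_pos h2, if_neg h3]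
          obtain ⟨hl, hr⟩ := ih (d - 1)
          constructor
          · simp only [List.length_cons, List.take_succ_cons]; rw [← hl]
          · simp only [List.length_cons, List.drop_succ_cons]
            rw [hr]
      · simp only [pvCollectA, h1, h2, if_false]
        obtain ⟨hl, hr⟩ := ih d
        constructor
        · simp only [List.length_cons, List.take_succ_cons]; rw [← hl]
        · simp only [List.length_cons, List.drop_succ_cons]
          rw [hr]

-- B's fused scan equals A's collect followed by A's comma scan (depth offset by one, start index j).
theorem scanB_eq : ∀ (t : List Char) (d j l : Int),
    pvScanB t d j l
      = (j + ((pvCollectA t d).1.length : Int), (pvScanA (pvCollectA t d).1 j (d - 1, l)).2) := by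
  intro t
  induction t with
  | nil => intro d j l; simp [pvCollectA, pvScanB, pvScanA]
  | cons c t ih =>
    intro d j l
    by_cases h1 : c = '('
    · subst h1
      simp only [pvCollectA, pvScanB, if_true, reduceIte]
      rw [ih (d + 1) (j + 1) l]
      simp [pvScanA, add_sub_cancel_right, sub_add_cancel]
      ring
    · by_cases h2 : c = ')'
      · by_cases h3 : d - 1 = 0
        · simp [pvCollectA, pvScanB, pvScanA, h1, h2, h3]
        · subst h2
          simp only [pvCollectA, pvScanB, h1, h3, if_false, reduceIte, ite_false]
          rw [ih (d - 1) (j + 1) l]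
          simp [pvScanA]
          ring
      · by_cases h4 : c = ',' ∧ d = 1
        · obtain ⟨hc, hd⟩ := h4
          subst hc; subst hd
          simp only [pvCollectA, pvScanB, h1, h2, if_false, and_true, reduceIte, ite_true]
          rw [ih 1 (j + 1) j]
          simp [pvScanA, h1, h2]
          ring
        · have h5 : ¬ (c = ',' ∧ d - 1 = 0) := by
            intro ⟨hc, hd⟩; exact h4 ⟨hc, by omega⟩
          simp only [pvCollectA, pvScanB, h1, h2, h4, if_false, ite_false]
          rw [ih d (j + 1) l]
          simp [pvScanA, h1, h2, h5]
          push_cast; ring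

theorem pvFixB_none (s : List Char) (h : pvFindRound s = none) : pvFixB s = s := by
  conv_lhs => rw [pvFixB.eq_def]
  split
  · rfl
  · rename_i pos h'; rw [h'] at h; exact absurd h (by simp)

theorem pvFixB_some (s : List Char) (pos : Nat) (h : pvFindRound s = some pos) :
    pvFixB s = s.take pos ++ (pvEmit (s.drop (pos + 6))).1 ++ pvFixB (pvEmit (s.drop (pos + 6))).2 := by
  conv_lhs => rw [pvFixB.eq_def]
  split
  · rename_i h'; rw [h'] at h; exact absurd h (by simp)
  · rename_i pos' h'; rw [h'] at h
    injection h with h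
    subst h
    rfl

theorem loopA_eq_fixB : ∀ (s : List Char), pvLoopA s = pvFixB s := by
  intro s
  match s with
  | [] => rw [pvFixB_none [] (by simp [pvFindRound])]; simp [pvLoopA]
  | c :: t =>
    by_cases hm : PySem.Chars.upper ((c :: t).take 6) = "ROUND(".toList
    · have hf : pvFindRound (c :: t) = some 0 := by
        unfold pvFindRound
        rw [if_pos]
        simp at hm
        exact hm
      rw [pvLoopA, if_pos hm, pvFixB_some (c :: t) 0 hf]
      have hsp := collectA_split (List.drop 5 t) 1
      have hsc : pvScanB (List.drop 5 t) 1 0 (-1)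
          = (((pvCollectA (List.drop 5 t) 1).1.length : Int),
             (pvScanA (pvCollectA (List.drop 5 t) 1).1 0 (0, -1)).2) := by
        rw [scanB_eq]; norm_num
      simp only [pvEmit]
      norm_num
      rw [hsc]
      simp only [Int.toNat_natCast]
      norm_num
      rw [← hsp.1]
      have h2 : List.drop (5 + ((pvCollectA (List.drop 5 t) 1).1.length + 1)) t
          = (pvCollectA (List.drop 5 t) 1).2 := by
        rw [hsp.2, List.drop_drop]
      rw [h2, ← loopA_eq_fixB (pvCollectA (List.drop 5 t) 1).2]
    · have hA : pvLoopA (c :: t) = c :: pvLoopA t := by rw [pvLoopA, if_neg hm]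
      rw [hA, loopA_eq_fixB t]
      cases hf : pvFindRound t with
      | none =>
        have hf2 : pvFindRound (c :: t) = none := by
          unfold pvFindRound; rw [if_neg hm, hf]; rfl
        rw [pvFixB_none _ hf2, pvFixB_none _ hf]
      | some k =>
        have hf2 : pvFindRound (c :: t) = some (k + 1) := by
          unfold pvFindRound; rw [if_neg hm, hf]; rfl
        rw [pvFixB_some _ _ hf2, pvFixB_some _ _ hf]
        have hd : (c :: t).drop (k + 1 + 6) = t.drop (k + 6) := by
          have : k + 1 + 6 = (k + 6) + 1 := by omega
          rw [this, List.drop_succ_cons]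
        rw [hd]
        simp [List.take_succ_cons]
  termination_by s => s.length
  decreasing_by
  · calc (pvCollectA (List.drop 5 t) 1).2.length
        ≤ (List.drop 5 t).length := pvCollectA_rest_le _ _
      _ ≤ t.length := by simp only [List.length_drop]; omega
      _ < (c :: t).length := by simp
  · simp only [List.length_cons]; omega

-- ===== VERDICT (by name: the statement is the Claim_ definition above) =====
theorem fix_round_py_spec : Claim_equal_fix_round_py := by
  intro sql _
  unfold Spec_fix_round_py fix_round_py fix_round_py_alt
  rw [loopA_eq_fixB]
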